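-- pv_equiv track=rewrite | github.com/KingICCrab/pim_mapper | validation/dram/final_formula.py | compute_formula
-- ===== SOURCE A (Python) =====
-- import math
--
-- def compute_formula(P_l3, Q_l3, C_l3, K_l3, R_l2, P_buffer, Q_buffer, S, block_h, block_w, H_in, W_in):
--     num_h_blocks = math.ceil(H_in / block_h)
--     num_w_blocks = math.ceil(W_in / block_w)
--
--     # 1. multi_block
--     multi_block = 0
--     for q in range(Q_l3):
--         w_start = q * Q_buffer
--         w_end = w_start + Q_buffer + S - 2
--         wb_start = w_start // block_w
--         wb_end = min(w_end // block_w, num_w_blocks - 1)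
--         multi_block += (wb_end - wb_start)
--     multi_block *= P_l3 * R_l2 * C_l3 * K_l3
--
--     # 2. R switches
--     r_switches_per_ck = 0
--     for p in range(P_l3):
--         for q in range(Q_l3):
--             w_end = q * Q_buffer + Q_buffer + S - 2
--             wb_end = min(w_end // block_w, num_w_blocks - 1)
--             wb_start = q * Q_buffer // block_w
--
--             last_hb, last_wb = None, None
--             for r in range(R_l2):
--                 h = p * P_buffer + r
--                 hb = min(h // block_h, num_h_blocks - 1)
--                 if last_hb is not None and (hb, wb_start) != (last_hb, last_wb):
--                     r_switches_per_ck += 1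
--                 last_hb, last_wb = hb, wb_end
--     r_switches = r_switches_per_ck * C_l3 * K_l3
--
--     # 3. P switches
--     p_switches_per_ck = 0
--     for p in range(1, P_l3):
--         h_prev = (p - 1) * P_buffer + R_l2 - 1
--         hb_prev = min(h_prev // block_h, num_h_blocks - 1)
--         w_end_prev = (Q_l3 - 1) * Q_buffer + Q_buffer + S - 2
--         wb_prev = min(w_end_prev // block_w, num_w_blocks - 1)
--
--         h_curr = p * P_buffer
--         hb_curr = min(h_curr // block_h, num_h_blocks - 1)
--         wb_curr = 0
--
--         if (hb_prev, wb_prev) != (hb_curr, wb_curr):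
--             p_switches_per_ck += 1
--     p_switches = p_switches_per_ck * C_l3 * K_l3
--
--     # 4. Q switches
--     q_switches_per_prck = 0
--     for q in range(1, Q_l3):
--         w_end_prev = (q - 1) * Q_buffer + Q_buffer + S - 2
--         wb_prev = min(w_end_prev // block_w, num_w_blocks - 1)
--         wb_curr = q * Q_buffer // block_w
--         if wb_prev != wb_curr:
--             q_switches_per_prck += 1
--     q_switches = q_switches_per_prck * P_l3 * R_l2 * C_l3 * K_l3
--
--     # 5. C switches
--     c_switches = (C_l3 - 1) * K_l3
--
--     # 6. K switches
--     k_switches = K_l3 - 1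
--
--     return multi_block + r_switches + p_switches + q_switches + c_switches + k_switches
-- ===== SOURCE B (Python) =====
-- def compute_formula(P_l3, Q_l3, C_l3, K_l3, R_l2, P_buffer, Q_buffer, S, block_h, block_w, H_in, W_in):
--     # O(P_l3 + Q_l3): the r loop is replaced by a closed form (hb is a clamped
--     # floor of an arithmetic sequence, so its change count is |hb_last - hb_first|),
--     # and the p and q dimensions are each scanned once.
--     num_h_blocks = -((-H_in) // block_h)
--     num_w_blocks = -((-W_in) // block_w)
--
--     # single pass over q: multi_block sum, q-switch count, and the split of q's
--     # by whether the q-tile starts and ends in the same w-block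
--     mb_sum = 0          # sum of (wb_end - wb_start)
--     q_sw = 0            # q's (>=1) whose wb_end(q-1) != wb_start(q)
--     q_neq = 0           # q's with wb_start != wb_end
--     prev_wb_end = None
--     for q in range(Q_l3):
--         wb_start = (q * Q_buffer) // block_w
--         wb_end = min((q * Q_buffer + Q_buffer + S - 2) // block_w, num_w_blocks - 1)
--         mb_sum += wb_end - wb_start
--         if wb_start != wb_end:
--             q_neq += 1
--         if prev_wb_end is not None and prev_wb_end != wb_start:
--             q_sw += 1
--         prev_wb_end = wb_end
--     q_eq = Q_l3 - q_neq if Q_l3 > 0 else 0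
--
--     # single pass over p: per-p h-block change count along r, and p-switch count
--     hb_changes = 0      # sum over p of |hb(p*Pb+R-1) - hb(p*Pb)|
--     p_sw = 0
--     nh1 = num_h_blocks - 1
--     wb_last_q = min(((Q_l3 - 1) * Q_buffer + Q_buffer + S - 2) // block_w, num_w_blocks - 1)
--     for p in range(P_l3):
--         hb0 = min((p * P_buffer) // block_h, nh1)
--         if R_l2 >= 2:
--             hbE = min((p * P_buffer + R_l2 - 1) // block_h, nh1)
--             hb_changes += abs(hbE - hb0)
--         if p >= 1:
--             hb_prev = min(((p - 1) * P_buffer + R_l2 - 1) // block_h, nh1)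
--             if (hb_prev, wb_last_q) != (hb0, 0):
--                 p_sw += 1
--
--     if R_l2 >= 2 and P_l3 > 0:
--         r_switches_per_ck = q_neq * P_l3 * (R_l2 - 1) + q_eq * hb_changes
--     else:
--         r_switches_per_ck = 0
--
--     return (mb_sum * P_l3 * R_l2 * C_l3 * K_l3
--             + r_switches_per_ck * C_l3 * K_l3
--             + p_sw * C_l3 * K_l3
--             + q_sw * P_l3 * R_l2 * C_l3 * K_l3
--             + (C_l3 - 1) * K_l3
--             + (K_l3 - 1))
-- ===== Notes on version B (the rewrite author's own statement) =====
-- stated objective: faster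
-- what changed: The O(P*Q*R) triple loop counting r-switches is replaced by a closed form (the clamped h-block index is a monotone floor sequence with unit steps, so its change count along r is |hb_last - hb_first|), leaving one O(Q) pass over q and one O(P) pass over p.
import Mathlib
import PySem

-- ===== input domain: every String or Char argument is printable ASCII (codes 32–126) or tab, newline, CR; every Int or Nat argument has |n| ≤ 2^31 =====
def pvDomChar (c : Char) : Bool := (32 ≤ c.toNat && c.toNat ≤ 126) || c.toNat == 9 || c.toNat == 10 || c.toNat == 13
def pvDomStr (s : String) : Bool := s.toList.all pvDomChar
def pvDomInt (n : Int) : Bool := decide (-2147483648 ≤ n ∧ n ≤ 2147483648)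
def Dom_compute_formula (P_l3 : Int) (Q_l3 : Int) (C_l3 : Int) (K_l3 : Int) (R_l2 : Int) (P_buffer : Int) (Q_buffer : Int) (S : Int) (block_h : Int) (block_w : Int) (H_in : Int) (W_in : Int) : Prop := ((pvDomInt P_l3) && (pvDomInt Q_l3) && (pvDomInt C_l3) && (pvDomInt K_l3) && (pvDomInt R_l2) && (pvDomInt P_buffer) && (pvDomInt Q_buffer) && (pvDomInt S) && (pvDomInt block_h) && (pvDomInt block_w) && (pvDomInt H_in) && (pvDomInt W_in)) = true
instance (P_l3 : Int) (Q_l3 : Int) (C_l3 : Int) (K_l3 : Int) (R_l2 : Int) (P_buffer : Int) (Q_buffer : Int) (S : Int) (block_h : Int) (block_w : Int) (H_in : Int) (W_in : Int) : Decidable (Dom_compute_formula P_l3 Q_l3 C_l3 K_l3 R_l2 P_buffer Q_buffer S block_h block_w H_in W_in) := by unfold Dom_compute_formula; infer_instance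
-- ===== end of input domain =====

-- ===== PORT A =====
-- B replaces the O(P*Q*R) r-switch triple loop by a closed-form change count; objective: faster (asymptotic).
-- math.ceil(H/b) on |ints| <= 2^31: float division is exact enough that it equals the integer ceiling -((-H)//b)
def pvCeilDiv (a b : Int) : Int := -(PySem.Int.floordiv (-a) b)

def pvA_mb_step (Q_buffer S block_w num_w_blocks : Int) (acc q : Int) : Int :=
  let w_start := q * Q_buffer
  let w_end := w_start + Q_buffer + S - 2
  let wb_start := PySem.Int.floordiv w_start block_w
  let wb_end := min (PySem.Int.floordiv w_end block_w) (num_w_blocks - 1)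
  acc + (wb_end - wb_start)

def pvA_r_step (P_buffer block_h num_h_blocks wb_start wb_end p : Int)
    (st : Int × Option (Int × Int)) (r : Int) : Int × Option (Int × Int) :=
  let h := p * P_buffer + r
  let hb := min (PySem.Int.floordiv h block_h) (num_h_blocks - 1)
  let cnt := match st.2 with
    | none => st.1
    | some last => if (hb, wb_start) ≠ last then st.1 + 1 else st.1
  (cnt, some (hb, wb_end))

def pvA_q_body (Q_buffer S block_w R_l2 P_buffer block_h num_h_blocks num_w_blocks p : Int)
    (acc q : Int) : Int :=
  let w_end := q * Q_buffer + Q_buffer + S - 2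
  let wb_end := min (PySem.Int.floordiv w_end block_w) (num_w_blocks - 1)
  let wb_start := PySem.Int.floordiv (q * Q_buffer) block_w
  ((PySem.List.pyRange 0 R_l2 1).foldl
    (pvA_r_step P_buffer block_h num_h_blocks wb_start wb_end p) (acc, none)).1

def pvA_p_body (Q_l3 Q_buffer S block_w R_l2 P_buffer block_h num_h_blocks num_w_blocks : Int)
    (acc p : Int) : Int :=
  (PySem.List.pyRange 0 Q_l3 1).foldl
    (pvA_q_body Q_buffer S block_w R_l2 P_buffer block_h num_h_blocks num_w_blocks p) acc

def pvA_psw_step (Q_l3 Q_buffer S block_w R_l2 P_buffer block_h num_h_blocks num_w_blocks : Int)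
    (acc p : Int) : Int :=
  let h_prev := (p - 1) * P_buffer + R_l2 - 1
  let hb_prev := min (PySem.Int.floordiv h_prev block_h) (num_h_blocks - 1)
  let w_end_prev := (Q_l3 - 1) * Q_buffer + Q_buffer + S - 2
  let wb_prev := min (PySem.Int.floordiv w_end_prev block_w) (num_w_blocks - 1)
  let h_curr := p * P_buffer
  let hb_curr := min (PySem.Int.floordiv h_curr block_h) (num_h_blocks - 1)
  let wb_curr : Int := 0
  if (hb_prev, wb_prev) ≠ (hb_curr, wb_curr) then acc + 1 else acc

def pvA_qsw_step (Q_buffer S block_w num_w_blocks : Int) (acc q : Int) : Int :=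
  let w_end_prev := (q - 1) * Q_buffer + Q_buffer + S - 2
  let wb_prev := min (PySem.Int.floordiv w_end_prev block_w) (num_w_blocks - 1)
  let wb_curr := PySem.Int.floordiv (q * Q_buffer) block_w
  if wb_prev ≠ wb_curr then acc + 1 else acc

def compute_formula (P_l3 : Int) (Q_l3 : Int) (C_l3 : Int) (K_l3 : Int) (R_l2 : Int) (P_buffer : Int) (Q_buffer : Int) (S : Int) (block_h : Int) (block_w : Int) (H_in : Int) (W_in : Int) : Int :=
  let num_h_blocks := pvCeilDiv H_in block_h
  let num_w_blocks := pvCeilDiv W_in block_w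
  let multi_block :=
    (PySem.List.pyRange 0 Q_l3 1).foldl (pvA_mb_step Q_buffer S block_w num_w_blocks) 0
  let multi_block := multi_block * (P_l3 * R_l2 * C_l3 * K_l3)
  let r_switches_per_ck :=
    (PySem.List.pyRange 0 P_l3 1).foldl
      (pvA_p_body Q_l3 Q_buffer S block_w R_l2 P_buffer block_h num_h_blocks num_w_blocks) 0
  let r_switches := r_switches_per_ck * C_l3 * K_l3
  let p_switches_per_ck :=
    (PySem.List.pyRange 1 P_l3 1).foldl
      (pvA_psw_step Q_l3 Q_buffer S block_w R_l2 P_buffer block_h num_h_blocks num_w_blocks) 0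
  let p_switches := p_switches_per_ck * C_l3 * K_l3
  let q_switches_per_prck :=
    (PySem.List.pyRange 1 Q_l3 1).foldl (pvA_qsw_step Q_buffer S block_w num_w_blocks) 0
  let q_switches := q_switches_per_prck * (P_l3 * R_l2 * C_l3 * K_l3)
  let c_switches := (C_l3 - 1) * K_l3
  let k_switches := K_l3 - 1
  multi_block + r_switches + p_switches + q_switches + c_switches + k_switches

-- ===== PORT B =====
-- state: (mb_sum, q_sw, q_neq, prev_wb_end)
def pvB_q_step (Q_buffer S block_w num_w_blocks : Int)
    (st : Int × Int × Int × Option Int) (q : Int) : Int × Int × Int × Option Int :=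
  let wb_start := PySem.Int.floordiv (q * Q_buffer) block_w
  let wb_end := min (PySem.Int.floordiv (q * Q_buffer + Q_buffer + S - 2) block_w) (num_w_blocks - 1)
  let mb := st.1 + (wb_end - wb_start)
  let q_neq := if wb_start ≠ wb_end then st.2.2.1 + 1 else st.2.2.1
  let q_sw := match st.2.2.2 with
    | none => st.2.1
    | some prev => if prev ≠ wb_start then st.2.1 + 1 else st.2.1
  (mb, q_sw, q_neq, some wb_end)

-- state: (hb_changes, p_sw)
def pvB_p_step (R_l2 P_buffer block_h nh1 wb_last_q : Int) (st : Int × Int) (p : Int) : Int × Int :=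
  let hb0 := min (PySem.Int.floordiv (p * P_buffer) block_h) nh1
  let hc := if 2 ≤ R_l2 then
      st.1 + |min (PySem.Int.floordiv (p * P_buffer + R_l2 - 1) block_h) nh1 - hb0|
    else st.1
  let psw := if 1 ≤ p then
      (let hb_prev := min (PySem.Int.floordiv ((p - 1) * P_buffer + R_l2 - 1) block_h) nh1
       if (hb_prev, wb_last_q) ≠ (hb0, (0 : Int)) then st.2 + 1 else st.2)
    else st.2
  (hc, psw)

def compute_formula_alt (P_l3 : Int) (Q_l3 : Int) (C_l3 : Int) (K_l3 : Int) (R_l2 : Int) (P_buffer : Int) (Q_buffer : Int) (S : Int) (block_h : Int) (block_w : Int) (H_in : Int) (W_in : Int) : Int :=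
  let num_h_blocks := pvCeilDiv H_in block_h
  let num_w_blocks := pvCeilDiv W_in block_w
  let qres :=
    (PySem.List.pyRange 0 Q_l3 1).foldl (pvB_q_step Q_buffer S block_w num_w_blocks)
      (0, 0, 0, none)
  let mb_sum := qres.1
  let q_sw := qres.2.1
  let q_neq := qres.2.2.1
  let q_eq := if 0 < Q_l3 then Q_l3 - q_neq else 0
  let nh1 := num_h_blocks - 1
  let wb_last_q :=
    min (PySem.Int.floordiv ((Q_l3 - 1) * Q_buffer + Q_buffer + S - 2) block_w) (num_w_blocks - 1)
  let pres :=
    (PySem.List.pyRange 0 P_l3 1).foldl (pvB_p_step R_l2 P_buffer block_h nh1 wb_last_q) (0, 0)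
  let hb_changes := pres.1
  let p_sw := pres.2
  let r_switches_per_ck :=
    if 2 ≤ R_l2 ∧ 0 < P_l3 then q_neq * P_l3 * (R_l2 - 1) + q_eq * hb_changes else 0
  mb_sum * P_l3 * R_l2 * C_l3 * K_l3 + r_switches_per_ck * C_l3 * K_l3 + p_sw * C_l3 * K_l3
    + q_sw * P_l3 * R_l2 * C_l3 * K_l3 + (C_l3 - 1) * K_l3 + (K_l3 - 1)

-- ===== PRECONDITION & SPEC =====
-- Pre_ excludes exactly block_h = 0 or block_w = 0, where Python A raises ZeroDivisionError (B raises too).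
def Pre_compute_formula (P_l3 : Int) (Q_l3 : Int) (C_l3 : Int) (K_l3 : Int) (R_l2 : Int) (P_buffer : Int) (Q_buffer : Int) (S : Int) (block_h : Int) (block_w : Int) (H_in : Int) (W_in : Int) : Prop :=
  block_h ≠ 0 ∧ block_w ≠ 0
instance (P_l3 : Int) (Q_l3 : Int) (C_l3 : Int) (K_l3 : Int) (R_l2 : Int) (P_buffer : Int) (Q_buffer : Int) (S : Int) (block_h : Int) (block_w : Int) (H_in : Int) (W_in : Int) : Decidable (Pre_compute_formula P_l3 Q_l3 C_l3 K_l3 R_l2 P_buffer Q_buffer S block_h block_w H_in W_in) := by unfold Pre_compute_formula; infer_instance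

def pvWitness_compute_formula : Int × Int × Int × Int × Int × Int × Int × Int × Int × Int × Int × Int :=
  (2, 3, 1, 1, 2, 2, 2, 1, 2, 2, 4, 4)

def Spec_compute_formula (P_l3 : Int) (Q_l3 : Int) (C_l3 : Int) (K_l3 : Int) (R_l2 : Int) (P_buffer : Int) (Q_buffer : Int) (S : Int) (block_h : Int) (block_w : Int) (H_in : Int) (W_in : Int) (out : Int) : Prop := out = compute_formula_alt P_l3 Q_l3 C_l3 K_l3 R_l2 P_buffer Q_buffer S block_h block_w H_in W_in
instance (P_l3 : Int) (Q_l3 : Int) (C_l3 : Int) (K_l3 : Int) (R_l2 : Int) (P_buffer : Int) (Q_buffer : Int) (S : Int) (block_h : Int) (block_w : Int) (H_in : Int) (W_in : Int) (out : Int) : Decidable (Spec_compute_formula P_l3 Q_l3 C_l3 K_l3 R_l2 P_buffer Q_buffer S block_h block_w H_in W_in out) := by unfold Spec_compute_formula; infer_instance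

-- ===== CLAIM (what is proved, stated in full; the proofs are below) =====
def Claim_equal_compute_formula : Prop := ∀ (P_l3 : Int) (Q_l3 : Int) (C_l3 : Int) (K_l3 : Int) (R_l2 : Int) (P_buffer : Int) (Q_buffer : Int) (S : Int) (block_h : Int) (block_w : Int) (H_in : Int) (W_in : Int), Dom_compute_formula P_l3 Q_l3 C_l3 K_l3 R_l2 P_buffer Q_buffer S block_h block_w H_in W_in → Pre_compute_formula P_l3 Q_l3 C_l3 K_l3 R_l2 P_buffer Q_buffer S block_h block_w H_in W_in → Spec_compute_formula P_l3 Q_l3 C_l3 K_l3 R_l2 P_buffer Q_buffer S block_h block_w H_in W_in (compute_formula P_l3 Q_l3 C_l3 K_l3 R_l2 P_buffer Q_buffer S block_h block_w H_in W_in)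

-- ===== LEMMAS AND PROOFS =====

-- abbreviations for the per-index quantities both ports compute
def pvWbs (Q_buffer block_w q : Int) : Int := PySem.Int.floordiv (q * Q_buffer) block_w
def pvWbe (Q_buffer S block_w num_w_blocks q : Int) : Int :=
  min (PySem.Int.floordiv (q * Q_buffer + Q_buffer + S - 2) block_w) (num_w_blocks - 1)
def pvG (P_buffer block_h num_h_blocks p r : Int) : Int :=
  min (PySem.Int.floordiv (p * P_buffer + r) block_h) (num_h_blocks - 1)
def pvRswVal (P_buffer block_h num_h_blocks R_l2 wbsq wbeq p : Int) : Int :=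
  if R_l2 ≤ 1 then 0
  else if wbsq = wbeq then
    |pvG P_buffer block_h num_h_blocks p (R_l2 - 1) - pvG P_buffer block_h num_h_blocks p 0|
  else R_l2 - 1

-- a pyRange starting at a nonnegative a equals the one with the end clamped to its toNat
lemma pvRange_toNat (a m : Int) (ha : 0 ≤ a) :
    PySem.List.pyRange a m 1 = PySem.List.pyRange a (m.toNat : Int) 1 := by
  by_cases h : m ≤ a
  · rw [PySem.List.pyRange_one_eq_nil h, PySem.List.pyRange_one_eq_nil (by omega)]
  · rw [Int.toNat_of_nonneg (by omega)]

-- unit steps of floor division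
lemma pv_fd_step (x b : Int) (hb : 0 < b) :
    PySem.Int.floordiv x b ≤ PySem.Int.floordiv (x + 1) b ∧
    PySem.Int.floordiv (x + 1) b ≤ PySem.Int.floordiv x b + 1 := by
  have h1 := PySem.Int.floordiv_eq_ediv_of_pos (a := x) hb
  have h2 := PySem.Int.floordiv_eq_ediv_of_pos (a := x + 1) hb
  rw [h1, h2]
  constructor
  · exact Int.ediv_le_ediv hb (by omega)
  · have h3 : (x + 1) / b ≤ (x + 1 * b) / b := Int.ediv_le_ediv hb (by omega)
    rw [Int.add_mul_ediv_right x 1 (by omega)] at h3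
    omega

lemma pv_fd_step_neg (x b : Int) (hb : b < 0) :
    PySem.Int.floordiv (x + 1) b ≤ PySem.Int.floordiv x b ∧
    PySem.Int.floordiv x b ≤ PySem.Int.floordiv (x + 1) b + 1 := by
  have h1 := pv_fd_step (-(x + 1)) (-b) (by omega)
  rw [show -(x + 1) + 1 = -x by ring] at h1
  rw [← PySem.Int.floordiv_neg_neg (a := x + 1) (b := b), ← PySem.Int.floordiv_neg_neg (a := x) (b := b)]
  omega

lemma pvG_step (P_buffer block_h num_h_blocks p : Int) (hb : block_h ≠ 0) :
    (∀ r, pvG P_buffer block_h num_h_blocks p r ≤ pvG P_buffer block_h num_h_blocks p (r + 1) ∧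
          pvG P_buffer block_h num_h_blocks p (r + 1) ≤ pvG P_buffer block_h num_h_blocks p r + 1) ∨
    (∀ r, pvG P_buffer block_h num_h_blocks p (r + 1) ≤ pvG P_buffer block_h num_h_blocks p r ∧
          pvG P_buffer block_h num_h_blocks p r ≤ pvG P_buffer block_h num_h_blocks p (r + 1) + 1) := by
  rcases lt_or_gt_of_ne hb with h | h
  · right
    intro r
    have := pv_fd_step_neg (p * P_buffer + r) block_h h
    rw [show p * P_buffer + r + 1 = p * P_buffer + (r + 1) by ring] at this
    simp only [pvG]
    omega
  · left
    intro r
    have := pv_fd_step (p * P_buffer + r) block_h h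
    rw [show p * P_buffer + r + 1 = p * P_buffer + (r + 1) by ring] at this
    simp only [pvG]
    omega

lemma pv_mono_up (g : Int → Int) (h : ∀ r, g r ≤ g (r + 1)) (a : Int) (k : Nat) :
    g a ≤ g (a + k) := by
  induction k with
  | zero => simp
  | succ n ih =>
      have := h (a + n)
      have h2 : (a + (n + 1 : Nat)) = (a + n) + 1 := by push_cast; ring
      rw [h2]
      omega

lemma pvA_r_step_eq (P_buffer block_h num_h_blocks wbsq wbeq p : Int)
    (st : Int × Option (Int × Int)) (r : Int) :
    pvA_r_step P_buffer block_h num_h_blocks wbsq wbeq p st r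
    = ((match st.2 with
        | none => st.1
        | some last => if (pvG P_buffer block_h num_h_blocks p r, wbsq) ≠ last then st.1 + 1
                       else st.1),
       some (pvG P_buffer block_h num_h_blocks p r, wbeq)) := rfl

lemma pv_mono_down (g : Int → Int) (h : ∀ r, g (r + 1) ≤ g r) (a : Int) (k : Nat) :
    g (a + k) ≤ g a := by
  induction k with
  | zero => simp
  | succ n ih =>
      have := h (a + n)
      have h2 : (a + (n + 1 : Nat)) = (a + n) + 1 := by push_cast; ring
      rw [h2]
      omega

-- the r loop of A, in closed form (n ≥ 1)
lemma pvA_rfold_nat (P_buffer block_h num_h_blocks wbsq wbeq p c : Int) (hb : block_h ≠ 0)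
    (n : Nat) (hn : 1 ≤ n) :
    (PySem.List.pyRange 0 (n : Int) 1).foldl
      (pvA_r_step P_buffer block_h num_h_blocks wbsq wbeq p) (c, none)
    = (c + (if wbsq = wbeq then
              |pvG P_buffer block_h num_h_blocks p ((n : Int) - 1) -
                pvG P_buffer block_h num_h_blocks p 0|
            else (n : Int) - 1),
       some (pvG P_buffer block_h num_h_blocks p ((n : Int) - 1), wbeq)) := by
  induction n with
  | zero => omega
  | succ m ih =>
    by_cases hm : m = 0
    · subst hm
      have hr : PySem.List.pyRange 0 ((0 + 1 : Nat) : Int) 1 = [0] := by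
        norm_num
        rw [PySem.List.pyRange_one_cons (by norm_num), PySem.List.pyRange_one_eq_nil (by norm_num)]
      rw [hr]
      simp only [List.foldl_cons, List.foldl_nil, pvA_r_step_eq]
      rw [show ((0 + 1 : Nat) : Int) - 1 = 0 by norm_num]
      refine Prod.ext_iff.mpr ⟨?_, rfl⟩
      simp only
      split_ifs <;> simp
    · have hm1 : 1 ≤ m := Nat.one_le_iff_ne_zero.mpr hm
      have hcast : ((m + 1 : Nat) : Int) = (m : Int) + 1 := by push_cast; ring
      rw [hcast, PySem.List.pyRange_one_succ_right (by positivity), List.foldl_append, ih hm1]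
      simp only [List.foldl_cons, List.foldl_nil, pvA_r_step_eq]
      set G := pvG P_buffer block_h num_h_blocks p with hG
      have hc1 : (0 : Int) + ((m - 1 : Nat) : Int) = (m : Int) - 1 := by omega
      have hc2 : (0 : Int) + ((m : Nat) : Int) = (m : Int) := by omega
      have hc3 : (m : Int) - 1 + 1 = (m : Int) := by ring
      have hkey : (G 0 ≤ G ((m : Int) - 1) ∧ G 0 ≤ G (m : Int) ∧
                    G ((m : Int) - 1) ≤ G (m : Int) ∧ G (m : Int) ≤ G ((m : Int) - 1) + 1)
          ∨ (G ((m : Int) - 1) ≤ G 0 ∧ G (m : Int) ≤ G 0 ∧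
              G (m : Int) ≤ G ((m : Int) - 1) ∧ G ((m : Int) - 1) ≤ G (m : Int) + 1) := by
        rcases pvG_step P_buffer block_h num_h_blocks p hb with hup | hdn
        · left
          simp only [← hG] at hup
          have h1 := pv_mono_up G (fun r => (hup r).1) 0 (m - 1)
          have h2 := pv_mono_up G (fun r => (hup r).1) 0 m
          have h3 := hup ((m : Int) - 1)
          rw [hc1] at h1; rw [hc2] at h2; rw [hc3] at h3
          exact ⟨h1, h2, h3.1, h3.2⟩
        · right
          simp only [← hG] at hdn
          have h1 := pv_mono_down G (fun r => (hdn r).1) 0 (m - 1)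
          have h2 := pv_mono_down G (fun r => (hdn r).1) 0 m
          have h3 := hdn ((m : Int) - 1)
          rw [hc1] at h1; rw [hc2] at h2; rw [hc3] at h3
          exact ⟨h1, h2, h3.1, h3.2⟩
      rw [show (m : Int) + 1 - 1 = (m : Int) by ring]
      by_cases hw : wbsq = wbeq
      · subst hw
        refine Prod.ext_iff.mpr ⟨?_, rfl⟩
        simp only
        simp only [if_true]
        by_cases heq : G (m : Int) = G ((m : Int) - 1)
        · rw [if_neg (by simp [Prod.ext_iff, heq]), heq]
        · rw [if_pos (by simp only [ne_eq, Prod.mk.injEq, not_and]; intro h; exact absurd h heq)]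
          rcases hkey with ⟨h1, h2, s1, s2⟩ | ⟨h1, h2, s1, s2⟩
          · rw [abs_of_nonneg (by omega), abs_of_nonneg (by omega)]
            omega
          · rw [abs_of_nonpos (by omega), abs_of_nonpos (by omega)]
            omega
      · simp only [if_neg hw]
        refine Prod.ext_iff.mpr ⟨?_, rfl⟩
        simp only
        have hcond : ((G (m : Int), wbsq) ≠ (G ((m : Int) - 1), wbeq)) := by
          simp only [ne_eq, Prod.mk.injEq, not_and]
          intro _; exact hw
        rw [if_pos hcond]
        omega

lemma pvA_rfold (P_buffer block_h num_h_blocks wbsq wbeq p c R_l2 : Int) (hb : block_h ≠ 0) :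
    ((PySem.List.pyRange 0 R_l2 1).foldl
      (pvA_r_step P_buffer block_h num_h_blocks wbsq wbeq p) (c, none)).1
    = c + pvRswVal P_buffer block_h num_h_blocks R_l2 wbsq wbeq p := by
  by_cases h0 : R_l2 ≤ 0
  · rw [PySem.List.pyRange_one_eq_nil h0]
    simp [pvRswVal, show R_l2 ≤ 1 by omega]
  · have hEq : ((R_l2.toNat : Nat) : Int) = R_l2 := by omega
    rw [← hEq, pvA_rfold_nat P_buffer block_h num_h_blocks wbsq wbeq p c hb R_l2.toNat (by omega)]
    simp only
    by_cases hR : R_l2 = 1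
    · subst hR
      norm_num [pvRswVal]
    · simp only [pvRswVal, if_neg (show ¬ ((R_l2.toNat : Nat) : Int) ≤ 1 by omega)]

-- sums of mapped ifs and affine maps
lemma pv_sum_map_ite (P : Int → Prop) [DecidablePred P] (x y : Int) (l : List Int) :
    (l.map (fun q => if P q then x else y)).sum
    = ((l.length : Int) - (l.countP (fun q => decide (¬ P q)) : Int)) * x
      + (l.countP (fun q => decide (¬ P q)) : Int) * y := by
  induction l with
  | nil => simp
  | cons a t ih =>
      simp only [List.map_cons, List.sum_cons, List.countP_cons, List.length_cons, ih]
      by_cases h : P a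
      · simp only [if_pos h, h, not_true_eq_false, decide_false]
        push_cast
        ring
      · simp only [if_neg h, h, not_false_eq_true, decide_true]
        push_cast
        ring

lemma pv_sum_map_affine (f : Int → Int) (a b : Int) (l : List Int) :
    (l.map (fun p => a * f p + b)).sum = a * (l.map f).sum + (l.length : Int) * b := by
  induction l with
  | nil => simp
  | cons x t ih =>
      simp only [List.map_cons, List.sum_cons, List.length_cons, ih]
      push_cast
      ring

lemma pvB_q_step_eq (Q_buffer S block_w num_w_blocks : Int)
    (st : Int × Int × Int × Option Int) (q : Int) :
    pvB_q_step Q_buffer S block_w num_w_blocks st q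
    = (st.1 + (pvWbe Q_buffer S block_w num_w_blocks q - pvWbs Q_buffer block_w q),
       (match st.2.2.2 with
        | none => st.2.1
        | some prev => if prev ≠ pvWbs Q_buffer block_w q then st.2.1 + 1 else st.2.1),
       (if pvWbs Q_buffer block_w q ≠ pvWbe Q_buffer S block_w num_w_blocks q then st.2.2.1 + 1
        else st.2.2.1),
       some (pvWbe Q_buffer S block_w num_w_blocks q)) := rfl

lemma pvB_p_step_eq (R_l2 P_buffer block_h nh1 wb_last_q : Int) (st : Int × Int) (p : Int) :
    pvB_p_step R_l2 P_buffer block_h nh1 wb_last_q st p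
    = ((if 2 ≤ R_l2 then
          st.1 + |pvG P_buffer block_h (nh1 + 1) p (R_l2 - 1) - pvG P_buffer block_h (nh1 + 1) p 0|
        else st.1),
       (if 1 ≤ p then
          (if (pvG P_buffer block_h (nh1 + 1) (p - 1) (R_l2 - 1), wb_last_q)
              ≠ (pvG P_buffer block_h (nh1 + 1) p 0, (0 : Int)) then st.2 + 1 else st.2)
        else st.2)) := by
  simp only [pvB_p_step, pvG, add_sub_cancel_right, add_sub_assoc, add_zero]

-- B's q loop, characterised
lemma pvB_qfold (Q_buffer S block_w num_w_blocks : Int) (n : Nat) :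
    (PySem.List.pyRange 0 (n : Int) 1).foldl (pvB_q_step Q_buffer S block_w num_w_blocks)
      (0, 0, 0, none)
    = (((PySem.List.pyRange 0 (n : Int) 1).map (fun q =>
          pvWbe Q_buffer S block_w num_w_blocks q - pvWbs Q_buffer block_w q)).sum,
       ((PySem.List.pyRange 1 (n : Int) 1).countP (fun q =>
          decide (pvWbe Q_buffer S block_w num_w_blocks (q - 1) ≠ pvWbs Q_buffer block_w q)) : Int),
       ((PySem.List.pyRange 0 (n : Int) 1).countP (fun q =>
          decide (pvWbs Q_buffer block_w q ≠ pvWbe Q_buffer S block_w num_w_blocks q)) : Int),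
       if n = 0 then none else some (pvWbe Q_buffer S block_w num_w_blocks ((n : Int) - 1))) := by
  induction n with
  | zero =>
      rw [show ((0 : Nat) : Int) = 0 by norm_num]
      rw [PySem.List.pyRange_one_eq_nil le_rfl, PySem.List.pyRange_one_eq_nil (by norm_num)]
      simp
  | succ m ih =>
      by_cases hm : m = 0
      · subst hm
        have hr0 : PySem.List.pyRange 0 ((0 + 1 : Nat) : Int) 1 = [0] := by
          norm_num
          rw [PySem.List.pyRange_one_cons (by norm_num), PySem.List.pyRange_one_eq_nil (by norm_num)]
        have hr1 : PySem.List.pyRange 1 ((0 + 1 : Nat) : Int) 1 = [] := by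
          rw [show ((0 + 1 : Nat) : Int) = 1 by norm_num]
          exact PySem.List.pyRange_one_eq_nil (by norm_num)
        rw [hr0, hr1]
        simp only [List.foldl_cons, List.foldl_nil, pvB_q_step_eq, List.map_cons, List.map_nil,
          List.sum_cons, List.sum_nil, List.countP_cons, List.countP_nil]
        first
          | (norm_num; split_ifs <;> simp_all)
          | norm_num
      · have hm1 : 1 ≤ m := Nat.one_le_iff_ne_zero.mpr hm
        have hcast : ((m + 1 : Nat) : Int) = (m : Int) + 1 := by push_cast; ring
        rw [hcast, PySem.List.pyRange_one_succ_right (by positivity),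
          PySem.List.pyRange_one_succ_right (by omega : (1 : Int) ≤ (m : Int)),
          List.foldl_append, ih]
        simp only [List.foldl_cons, List.foldl_nil, pvB_q_step_eq, List.map_append,
          List.sum_append, List.countP_append, List.map_cons, List.map_nil, List.sum_cons,
          List.sum_nil, List.countP_cons, List.countP_nil]
        rw [if_neg hm, if_neg (by omega : ¬ m + 1 = 0)]
        simp only
        refine Prod.ext_iff.mpr ⟨by ring, ?_⟩
        refine Prod.ext_iff.mpr ⟨?_, ?_⟩
        · simp only [show (m : Int) + 1 - 1 = (m : Int) by ring, decide_eq_true_eq]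
          split_ifs <;> (try rfl) <;> push_cast <;> omega
        · refine Prod.ext_iff.mpr ⟨?_, by simp [show (m : Int) + 1 - 1 = (m : Int) by ring]⟩
          simp only [decide_eq_true_eq]
          split_ifs <;> (try rfl) <;> push_cast <;> omega

-- B's p loop, characterised
lemma pvB_pfold (R_l2 P_buffer block_h nh1 wb_last_q : Int) (n : Nat) :
    (PySem.List.pyRange 0 (n : Int) 1).foldl (pvB_p_step R_l2 P_buffer block_h nh1 wb_last_q) (0, 0)
    = ((if 2 ≤ R_l2 then
          ((PySem.List.pyRange 0 (n : Int) 1).map (fun p =>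
            |pvG P_buffer block_h (nh1 + 1) p (R_l2 - 1) - pvG P_buffer block_h (nh1 + 1) p 0|)).sum
        else 0),
       ((PySem.List.pyRange 1 (n : Int) 1).countP (fun p =>
          decide ((pvG P_buffer block_h (nh1 + 1) (p - 1) (R_l2 - 1), wb_last_q)
                   ≠ (pvG P_buffer block_h (nh1 + 1) p 0, (0 : Int)))) : Int)) := by
  induction n with
  | zero =>
      rw [show ((0 : Nat) : Int) = 0 by norm_num]
      rw [PySem.List.pyRange_one_eq_nil le_rfl, PySem.List.pyRange_one_eq_nil (by norm_num)]
      simp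
  | succ m ih =>
      by_cases hm : m = 0
      · subst hm
        have hr0 : PySem.List.pyRange 0 ((0 + 1 : Nat) : Int) 1 = [0] := by
          norm_num
          rw [PySem.List.pyRange_one_cons (by norm_num), PySem.List.pyRange_one_eq_nil (by norm_num)]
        have hr1 : PySem.List.pyRange 1 ((0 + 1 : Nat) : Int) 1 = [] := by
          rw [show ((0 + 1 : Nat) : Int) = 1 by norm_num]
          exact PySem.List.pyRange_one_eq_nil (by norm_num)
        rw [hr0, hr1]
        simp only [List.foldl_cons, List.foldl_nil, pvB_p_step_eq, List.map_cons, List.map_nil,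
          List.sum_cons, List.sum_nil, List.countP_cons, List.countP_nil]
        first
          | (norm_num; split_ifs <;> simp_all)
          | norm_num
      · have hm1 : 1 ≤ m := Nat.one_le_iff_ne_zero.mpr hm
        have hcast : ((m + 1 : Nat) : Int) = (m : Int) + 1 := by push_cast; ring
        rw [hcast, PySem.List.pyRange_one_succ_right (by positivity),
          PySem.List.pyRange_one_succ_right (by omega : (1 : Int) ≤ (m : Int)),
          List.foldl_append, ih]
        simp only [List.foldl_cons, List.foldl_nil, pvB_p_step_eq, List.map_append,
          List.sum_append, List.countP_append, List.map_cons, List.map_nil, List.sum_cons,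
          List.sum_nil, List.countP_cons, List.countP_nil]
        refine Prod.ext_iff.mpr ⟨?_, ?_⟩
        · simp only
          split_ifs <;> simp_all <;> ring
        · simp only
          rw [if_pos (by omega : (1 : Int) ≤ (m : Int))]
          simp only [decide_eq_true_eq]
          split_ifs <;> (try rfl) <;> push_cast <;> omega

-- ===== VERDICT (by name: the statement is the Claim_ definition above) =====
theorem compute_formula_spec : Claim_equal_compute_formula := by
  intro P_l3 Q_l3 C_l3 K_l3 R_l2 P_buffer Q_buffer S block_h block_w H_in W_in hdom hpre
  obtain ⟨hbh, hbw⟩ := hpre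
  unfold Spec_compute_formula
  simp only [compute_formula, compute_formula_alt]
  rw [pvRange_toNat 0 Q_l3 (by norm_num), pvRange_toNat 1 Q_l3 (by norm_num),
    pvRange_toNat 0 P_l3 (by norm_num), pvRange_toNat 1 P_l3 (by norm_num)]
  rw [pvB_qfold, pvB_pfold]
  dsimp only
  -- A's multi_block loop is a plain accumulation
  rw [show pvA_mb_step Q_buffer S block_w (pvCeilDiv W_in block_w)
        = (fun acc q => acc + (pvWbe Q_buffer S block_w (pvCeilDiv W_in block_w) q
            - pvWbs Q_buffer block_w q)) from rfl,
    PySem.List.foldl_add]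
  -- A's q-switch loop is a conditional count
  rw [show pvA_qsw_step Q_buffer S block_w (pvCeilDiv W_in block_w)
        = (fun acc q => if pvWbe Q_buffer S block_w (pvCeilDiv W_in block_w) (q - 1)
              ≠ pvWbs Q_buffer block_w q then acc + 1 else acc) from rfl,
    PySem.List.foldl_ite_add_one]
  -- A's p-switch loop is a conditional count
  have hpsw : pvA_psw_step Q_l3 Q_buffer S block_w R_l2 P_buffer block_h
      (pvCeilDiv H_in block_h) (pvCeilDiv W_in block_w)
      = (fun acc p => if (pvG P_buffer block_h (pvCeilDiv H_in block_h) (p - 1) (R_l2 - 1),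
            pvWbe Q_buffer S block_w (pvCeilDiv W_in block_w) (Q_l3 - 1))
            ≠ (pvG P_buffer block_h (pvCeilDiv H_in block_h) p 0, (0 : Int)) then acc + 1
          else acc) := by
    funext acc p
    simp only [pvA_psw_step, pvG, pvWbe, add_sub_assoc, add_zero]
  rw [hpsw, PySem.List.foldl_ite_add_one]
  -- A's nested r-switch loops, in closed form
  have hq : ∀ (p acc q : Int),
      pvA_q_body Q_buffer S block_w R_l2 P_buffer block_h (pvCeilDiv H_in block_h)
        (pvCeilDiv W_in block_w) p acc q
      = acc + pvRswVal P_buffer block_h (pvCeilDiv H_in block_h) R_l2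
          (pvWbs Q_buffer block_w q) (pvWbe Q_buffer S block_w (pvCeilDiv W_in block_w) q) p :=
    fun p acc q => pvA_rfold P_buffer block_h (pvCeilDiv H_in block_h)
      (pvWbs Q_buffer block_w q) (pvWbe Q_buffer S block_w (pvCeilDiv W_in block_w) q) p acc R_l2 hbh
  have hp : ∀ (acc p : Int),
      pvA_p_body Q_l3 Q_buffer S block_w R_l2 P_buffer block_h (pvCeilDiv H_in block_h)
        (pvCeilDiv W_in block_w) acc p
      = acc + ((PySem.List.pyRange 0 (Q_l3.toNat : Int) 1).map (fun q =>
          pvRswVal P_buffer block_h (pvCeilDiv H_in block_h) R_l2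
            (pvWbs Q_buffer block_w q) (pvWbe Q_buffer S block_w (pvCeilDiv W_in block_w) q) p)).sum := by
    intro acc p
    simp only [pvA_p_body]
    rw [pvRange_toNat 0 Q_l3 (by norm_num)]
    rw [PySem.List.foldl_congr_mem _ _
      (fun acc q => acc + pvRswVal P_buffer block_h (pvCeilDiv H_in block_h) R_l2
        (pvWbs Q_buffer block_w q) (pvWbe Q_buffer S block_w (pvCeilDiv W_in block_w) q) p) _
      (fun acc q _ => hq p acc q), PySem.List.foldl_add]
  rw [PySem.List.foldl_congr_mem _ _
    (fun acc p => acc + ((PySem.List.pyRange 0 (Q_l3.toNat : Int) 1).map (fun q =>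
      pvRswVal P_buffer block_h (pvCeilDiv H_in block_h) R_l2 (pvWbs Q_buffer block_w q)
        (pvWbe Q_buffer S block_w (pvCeilDiv W_in block_w) q) p)).sum) _
    (fun acc p _ => hp acc p), PySem.List.foldl_add]
  simp only [zero_add, sub_add_cancel]
  by_cases hR : R_l2 ≤ 1
  · simp only [pvRswVal, hR, if_true, if_neg (show ¬ (2 ≤ R_l2 ∧ 0 < P_l3) by omega)]
    simp only [List.map_const', List.sum_replicate, smul_zero, add_zero]
    simp only [pvWbs, pvWbe, pvG, ne_eq, decide_not]
    ring
  · simp only [pvRswVal, if_neg hR]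
    simp only [pv_sum_map_ite (P := fun q =>
      pvWbs Q_buffer block_w q = pvWbe Q_buffer S block_w (pvCeilDiv W_in block_w) q)]
    rw [pv_sum_map_affine]
    simp only [PySem.List.length_pyRange_one, sub_zero, Int.toNat_natCast]
    simp only [if_pos (show 2 ≤ R_l2 by omega)]
    simp only [ne_eq]
    by_cases hP : 0 < P_l3
    · rw [if_pos ⟨by omega, hP⟩]
      by_cases hQ : 0 < Q_l3
      · rw [if_pos hQ]
        rw [show ((Q_l3.toNat : Nat) : Int) = Q_l3 by omega,
          show ((P_l3.toNat : Nat) : Int) = P_l3 by omega]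
        simp only [pvWbs, pvWbe, pvG, ne_eq, decide_not]
        ring
      · rw [if_neg hQ]
        have hQt : ((Q_l3.toNat : Nat) : Int) = 0 := by omega
        rw [hQt, PySem.List.pyRange_one_eq_nil (le_refl (0 : Int)),
          PySem.List.pyRange_one_eq_nil (show (0 : Int) ≤ 1 by norm_num)]
        simp only [List.countP_nil, List.map_nil, List.sum_nil, Nat.cast_zero]
        simp only [pvWbs, pvWbe, pvG, ne_eq, decide_not]
        ring
    · rw [if_neg (by tauto)]
      have hPt : ((P_l3.toNat : Nat) : Int) = 0 := by omega
      rw [hPt, PySem.List.pyRange_one_eq_nil (le_refl (0 : Int)),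
        PySem.List.pyRange_one_eq_nil (show (0 : Int) ≤ 1 by norm_num)]
      simp only [List.countP_nil, List.map_nil, List.sum_nil, List.length_nil, Nat.cast_zero]
      simp only [pvWbs, pvWbe, pvG, ne_eq, decide_not]
      ring
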